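-- pv_equiv track=rewrite | github.com/alumnos-ingcom/python-1-erica-1289 | src/ejercicio4.py | suma_lenta
-- ===== SOURCE A (Python) =====
-- def suma_lenta(numero, otro_numero):
--
--     suma = numero
--     c=0
--     if otro_numero  > 0:
--         while c < (otro_numero):
--             suma +=1
--             c +=1
--     else:
--         while c < -1*(otro_numero):
--             suma -=1
--             c +=1
--     return suma
-- ===== SOURCE B (Python) =====
-- def suma_lenta(numero, otro_numero):
--     return numero + otro_numero
-- ===== Notes on version B (the rewrite author's own statement) =====
-- stated objective: faster
-- what changed: Replaces the unit-step while-loops with the closed-form integer addition numero + otro_numero.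
import Mathlib
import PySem

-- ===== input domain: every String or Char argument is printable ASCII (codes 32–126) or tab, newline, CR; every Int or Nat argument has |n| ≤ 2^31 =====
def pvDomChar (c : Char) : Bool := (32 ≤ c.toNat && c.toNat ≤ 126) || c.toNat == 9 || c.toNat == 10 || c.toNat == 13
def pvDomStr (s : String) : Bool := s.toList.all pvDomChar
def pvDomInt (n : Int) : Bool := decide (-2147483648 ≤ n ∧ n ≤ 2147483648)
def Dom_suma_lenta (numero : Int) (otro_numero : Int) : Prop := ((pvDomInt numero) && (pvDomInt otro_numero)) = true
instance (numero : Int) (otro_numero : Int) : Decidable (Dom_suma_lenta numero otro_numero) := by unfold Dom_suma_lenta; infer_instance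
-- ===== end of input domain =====

-- B replaces A's two unit-step while-loops with plain integer addition (faster: O(1) vs O(|otro_numero|)).

-- ===== PORT A =====
-- while c < otro_numero: suma += 1; c += 1   (loop runs otro_numero.toNat times)
def sumaLoopAdd (suma : Int) : Nat → Int
  | 0 => suma
  | n + 1 => sumaLoopAdd (suma + 1) n

-- while c < -otro_numero: suma -= 1; c += 1   (loop runs (-otro_numero).toNat times)
def sumaLoopSub (suma : Int) : Nat → Int
  | 0 => suma
  | n + 1 => sumaLoopSub (suma - 1) n

def suma_lenta (numero : Int) (otro_numero : Int) : Int :=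
  if otro_numero > 0 then sumaLoopAdd numero otro_numero.toNat
  else sumaLoopSub numero (-otro_numero).toNat

-- ===== PORT B =====
def suma_lenta_alt (numero : Int) (otro_numero : Int) : Int := numero + otro_numero

-- ===== PRECONDITION & SPEC =====
def Spec_suma_lenta (numero : Int) (otro_numero : Int) (out : Int) : Prop := out = suma_lenta_alt numero otro_numero
instance (numero : Int) (otro_numero : Int) (out : Int) : Decidable (Spec_suma_lenta numero otro_numero out) := by unfold Spec_suma_lenta; infer_instance

-- ===== CLAIM (what is proved, stated in full; the proofs are below) =====
def Claim_equal_suma_lenta : Prop := ∀ (numero : Int) (otro_numero : Int), Dom_suma_lenta numero otro_numero → Spec_suma_lenta numero otro_numero (suma_lenta numero otro_numero)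

-- ===== LEMMAS AND PROOFS =====
theorem sumaLoopAdd_eq (s : Int) (n : Nat) : sumaLoopAdd s n = s + n := by
  induction n generalizing s with
  | zero => simp [sumaLoopAdd]
  | succ k ih => simp [sumaLoopAdd, ih]; push_cast; ring

theorem sumaLoopSub_eq (s : Int) (n : Nat) : sumaLoopSub s n = s - n := by
  induction n generalizing s with
  | zero => simp [sumaLoopSub]
  | succ k ih => simp [sumaLoopSub, ih]; push_cast; ring

-- ===== VERDICT (by name: the statement is the Claim_ definition above) =====
theorem suma_lenta_spec : Claim_equal_suma_lenta := by
  intro numero otro_numero _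
  unfold Spec_suma_lenta suma_lenta suma_lenta_alt
  split_ifs with h
  · rw [sumaLoopAdd_eq]; omega
  · rw [sumaLoopSub_eq]; omega
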